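-- pv_equiv track=rewrite | github.com/miliar/Code_Jam_Webscraper | solutions_python/solutions_year13_round0_nr2/1560.py | lawnmover
-- ===== SOURCE A (Python) =====
-- def lawnmover(string,N,M):
--   i=0
--   j=0
--   dict={}
--   output='YES'
--   for char in string:
--     dict[j]='F'
--     j=j+1
--   for char in string:
--     if dict[i]=='F':
--       if char=='2':
--         dict[i]='T'
--       else:
--         ssc=string[i%M:(N-1)*M+1+(i%M):M]
--         if ssc.find('2')==-1:
--           index=i%M
--           while index<=(N-1)*M +1:
--             dict[index]='T'
--             index=index+M
--         else:
--           ssc=string[i-i%M:M+(i-i%M):1]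
--           if ssc.find('2')==-1:
--             index=i-i%M
--             while index < M+(i-i%M):
--               dict[index]='T'
--               index=index+1
--           else:
--             dict[i]='F'
--             output='NO'
--             break
--     i=i+1
--   return output
-- ===== SOURCE B (Python) =====
-- def lawnmover(string, N, M):
--     if not string:
--         return 'YES'
--     col2 = ['2' in string[r:(N - 1) * M + 1 + r:M] for r in range(min(M, len(string)))]
--     row2 = ['2' in string[s:s + M] for s in range(0, len(string), M)]
--     for i, ch in enumerate(string):
--         if ch != '2' and col2[i % M] and row2[i // M]:
--             return 'NO'
--     return 'YES'
-- ===== Notes on version B (the rewrite author's own statement) =====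
-- stated objective: faster
-- what changed: A re-scans the column and row slice for every cell and maintains a memo dict; B precomputes a has-'2' flag per column and per row once and then decides each cell in O(1).
-- outside the precondition, e.g. on lawnmover('22', 1, 0): A returns 'YES', B raises ValueError; on lawnmover('12', 1, -1): A does not finish within the time limit, B raises IndexError
import Mathlib
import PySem

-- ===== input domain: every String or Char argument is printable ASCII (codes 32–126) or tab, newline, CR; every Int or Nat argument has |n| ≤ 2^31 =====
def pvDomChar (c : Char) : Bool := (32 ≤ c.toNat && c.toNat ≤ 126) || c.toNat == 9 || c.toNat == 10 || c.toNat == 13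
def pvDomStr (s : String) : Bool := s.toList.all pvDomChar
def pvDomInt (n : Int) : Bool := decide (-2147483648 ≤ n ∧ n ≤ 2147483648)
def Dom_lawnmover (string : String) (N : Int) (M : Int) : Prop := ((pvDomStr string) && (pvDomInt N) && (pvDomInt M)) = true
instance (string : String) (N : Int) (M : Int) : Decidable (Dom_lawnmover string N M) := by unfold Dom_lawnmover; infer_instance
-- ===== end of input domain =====

-- B precomputes one has-'2' flag per column and per row and decides each cell in O(1),
-- instead of A's per-cell slice re-scans with a memo dict (a different, asymptotically cheaper algorithm).

-- ===== PORT A =====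

-- first for-loop: dict[j] = 'F' for j = 0 .. len(string)-1
def lawnInit : List Char → Int → PySem.Dict Int Char → PySem.Dict Int Char
  | [], _, d => d
  | _ :: rest, j, d => lawnInit rest (j + 1) (d.insert j 'F')

-- second for-loop with break; 'dict[i]' is rendered as getD i 'F' (the key 0 ≤ i < len is
-- always present, so this is exact); each 'while index ≤/< bound: …; index += step' with
-- positive step (Pre_ gives M > 0) is exactly a fold over range(start, bound(+1), step);
-- for M ≤ 0 Python's first while loop either never runs or diverges — the guard renders
-- the never-runs case totally (Pre_ excludes M ≤ 0 anyway).
def lawnLoopA (s : List Char) (N M : Int) : List Char → Int → PySem.Dict Int Char → String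
  | [], _, _ => "YES"
  | c :: rest, i, d =>
    if d.getD i 'F' = 'F' then
      if c = '2' then lawnLoopA s N M rest (i + 1) (d.insert i 'T')
      else
        let ssc := (PySem.List.slice? s (some (PySem.Int.mod i M)) (some ((N - 1) * M + 1 + PySem.Int.mod i M)) M).getD []
        if PySem.Chars.find ssc ['2'] = -1 then
          lawnLoopA s N M rest (i + 1)
            (((if 0 < M then PySem.List.pyRange (PySem.Int.mod i M) ((N - 1) * M + 1 + 1) M else [])).foldl
              (fun d idx => d.insert idx 'T') d)
        else
          let ssc2 := (PySem.List.slice? s (some (i - PySem.Int.mod i M)) (some (M + (i - PySem.Int.mod i M))) 1).getD []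
          if PySem.Chars.find ssc2 ['2'] = -1 then
            lawnLoopA s N M rest (i + 1)
              ((PySem.List.pyRange (i - PySem.Int.mod i M) (M + (i - PySem.Int.mod i M)) 1).foldl
                (fun d idx => d.insert idx 'T') d)
          else
            "NO"   -- output = 'NO'; break
    else lawnLoopA s N M rest (i + 1) d

def lawnmover (string : String) (N : Int) (M : Int) : String :=
  lawnLoopA string.toList N M string.toList 0 (lawnInit string.toList 0 PySem.Dict.empty)

-- ===== PORT B =====

-- for i, ch in enumerate(string): early return 'NO'
def lawnLoopB (col2 row2 : List Bool) (M : Int) : List (Int × Char) → String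
  | [] => "YES"
  | (i, ch) :: rest =>
    if (ch ≠ '2' && PySem.List.pyGetD col2 (PySem.Int.mod i M) false
          && PySem.List.pyGetD row2 (PySem.Int.floordiv i M) false) then "NO"
    else lawnLoopB col2 row2 M rest

def lawnmover_alt (string : String) (N : Int) (M : Int) : String :=
  let l := string.toList
  if l.isEmpty then "YES"
  else
    let col2 := (PySem.List.pyRange 0 (min M (l.length : Int)) 1).map
      (fun r => PySem.Chars.isIn ['2'] ((PySem.List.slice? l (some r) (some ((N - 1) * M + 1 + r)) M).getD []))
    let row2 := (PySem.List.pyRange 0 (l.length : Int) M).map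
      (fun t => PySem.Chars.isIn ['2'] (PySem.List.slice l (some t) (some (t + M))))
    lawnLoopB col2 row2 M (PySem.List.enumerate l 0)

-- ===== PRECONDITION & SPEC =====
-- Pre_ excludes M ≤ 0 for a nonempty string: there A raises ZeroDivisionError (M = 0 at the
-- first non-'2' cell), or its marking while-loop diverges (M < 0), and on the remaining
-- accidental returns (e.g. an all-'2' string with M = 0) B raises ValueError from range(0, len, M).
def Pre_lawnmover (string : String) (N : Int) (M : Int) : Prop := string = "" ∨ 0 < M
instance (string : String) (N : Int) (M : Int) : Decidable (Pre_lawnmover string N M) := by unfold Pre_lawnmover; infer_instance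
def pvWitness_lawnmover : String × Int × Int := ("1212", 2, 2)

def Spec_lawnmover (string : String) (N : Int) (M : Int) (out : String) : Prop := out = lawnmover_alt string N M
instance (string : String) (N : Int) (M : Int) (out : String) : Decidable (Spec_lawnmover string N M out) := by unfold Spec_lawnmover; infer_instance

-- ===== CLAIM (what is proved, stated in full; the proofs are below) =====
def Claim_equal_lawnmover : Prop := ∀ (string : String) (N : Int) (M : Int), Dom_lawnmover string N M → Pre_lawnmover string N M → Spec_lawnmover string N M (lawnmover string N M)

-- ===== LEMMAS AND PROOFS =====

-- the column/row membership tests both programs perform, and the per-cell "bad" predicate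
def colHas (l : List Char) (N M r : Int) : Bool :=
  PySem.Chars.isIn ['2'] ((PySem.List.slice? l (some r) (some ((N - 1) * M + 1 + r)) M).getD [])
def rowHas (l : List Char) (M t : Int) : Bool :=
  PySem.Chars.isIn ['2'] (PySem.List.slice l (some t) (some (t + M)))
def badAt (l : List Char) (N M : Int) (j : Nat) : Bool :=
  (l.getD j '2' != '2') && colHas l N M (PySem.Int.mod (j : Int) M)
    && rowHas l M ((j : Int) - PySem.Int.mod (j : Int) M)
def anyBad (l : List Char) (N M : Int) (n : Nat) : Bool :=
  decide (∃ j, j < l.length ∧ n ≤ j ∧ badAt l N M j = true)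

lemma find2_iff (s : List Char) : PySem.Chars.find s ['2'] = -1 ↔ PySem.Chars.isIn ['2'] s = false := by
  rw [PySem.Chars.find_eq_neg_one_iff]
  simp [← PySem.Chars.isIn_iff_infix]

-- xs[a:b:1] (step written out) is xs[a:b], for 0 ≤ a, 0 ≤ b
lemma filterMap_range_getElem? {α : Type} (xs : List α) (j : Nat) :
    ∀ m : Nat, (List.range m).filterMap (fun k => xs[j + k]?) = (xs.drop j).take m := by
  intro m
  induction m with
  | zero => simp
  | succ m ih =>
      rw [List.range_succ, List.filterMap_append, ih, List.take_add_one]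
      simp only [List.getElem?_drop]
      cases h : xs[j + m]? <;> simp [h]

lemma slice?_one_nonneg {α : Type} (xs : List α) (a b : Int) (ha : 0 ≤ a) (hb : 0 ≤ b) :
    PySem.List.slice? xs (some a) (some b) 1 = some (PySem.List.slice xs (some a) (some b)) := by
  simp only [PySem.List.slice?, PySem.List.sliceIndices, PySem.List.slice, PySem.List.clampIdx]
  norm_num
  have h1 : ¬ a < 0 := by omega
  have h2 : ¬ b < 0 := by omega
  simp only [h1, h2, if_false]
  set s := min a (xs.length : Int) with hs
  set e := min b (xs.length : Int) with he
  have hs0 : 0 ≤ s := by omega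
  have hfun : (fun k : Nat => xs[(s + (k : Int)).toNat]?) = fun k : Nat => xs[s.toNat + k]? := by
    funext k; congr 1; omega
  rw [hfun, filterMap_range_getElem?]
  congr 1
  · split_ifs with h <;> omega
  · congr 1
    omega

lemma getD_foldl_insert (d : PySem.Dict Int Char) (ks : List Int) (k : Int) :
    ((ks.foldl (fun d idx => d.insert idx 'T') d).getD k 'F') =
      if k ∈ ks then 'T' else d.getD k 'F' := by
  induction ks generalizing d with
  | nil => simp
  | cons a ks ih =>
      rw [List.foldl_cons, ih]
      by_cases hk : k ∈ ks
      · simp [hk]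
      · by_cases hka : k = a <;>
          simp [hk, hka, PySem.Dict.getD_insert, List.mem_cons]

lemma lawnInit_getD (rest : List Char) (j : Int) (d : PySem.Dict Int Char)
    (h : ∀ k, d.getD k 'F' = 'F') : ∀ k, (lawnInit rest j d).getD k 'F' = 'F' := by
  induction rest generalizing j d with
  | nil => simpa [lawnInit] using h
  | cons c rest ih =>
      intro k
      refine ih (j + 1) _ (fun k' => ?_) k
      rw [PySem.Dict.getD_insert]
      split_ifs <;> simp [h]

lemma mod_of_shift (M a k : Int) (hM : 0 < M) (ha : 0 ≤ a) (haM : a < M)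
    (hdvd : M ∣ k - a) : PySem.Int.mod k M = a := by
  obtain ⟨c, hc⟩ := hdvd
  rw [PySem.Int.mod_eq_emod_of_pos hM]
  have : k = a + M * c := by omega
  subst this
  rw [Int.add_mul_emod_self_left]
  exact Int.emod_eq_of_lt ha haM

lemma anyBad_succ (l : List Char) (N M : Int) (n : Nat) (h : badAt l N M n = false) :
    anyBad l N M n = anyBad l N M (n + 1) := by
  unfold anyBad
  apply decide_eq_decide.mpr
  constructor
  · rintro ⟨j, hj, hnj, hb⟩
    refine ⟨j, hj, ?_, hb⟩
    rcases Nat.eq_or_lt_of_le hnj with rfl | h'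
    · simp_all
    · omega
  · rintro ⟨j, hj, hnj, hb⟩; exact ⟨j, hj, by omega, hb⟩

lemma anyBad_true (l : List Char) (N M : Int) (n : Nat) (hn : n < l.length)
    (h : badAt l N M n = true) : anyBad l N M n = true := by
  unfold anyBad; exact decide_eq_true ⟨n, hn, le_refl n, h⟩

lemma anyBad_false_of_ge (l : List Char) (N M : Int) (n : Nat) (hn : l.length ≤ n) :
    anyBad l N M n = false := by
  unfold anyBad
  apply decide_eq_false
  rintro ⟨j, hj, hnj, _⟩; omega


lemma drop_cons_len (l : List Char) (n : Nat) (c : Char) (rest : List Char)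
    (h : l.drop n = c :: rest) : n < l.length := by
  have := congrArg List.length h
  simp at this
  omega

lemma drop_cons_getD (l : List Char) (n : Nat) (c : Char) (rest : List Char)
    (h : l.drop n = c :: rest) : l.getD n '2' = c := by
  have h0 : l[n]? = some c := by
    have : (l.drop n)[0]? = l[n + 0]? := List.getElem?_drop
    rw [h] at this
    simpa using this.symm
  simp [List.getD_eq_getElem?_getD, h0]

lemma drop_cons_tail (l : List Char) (n : Nat) (c : Char) (rest : List Char)
    (h : l.drop n = c :: rest) : l.drop (n + 1) = rest := by
  have : l.drop (n + 1) = (l.drop n).drop 1 := by rw [List.drop_drop, Nat.add_comm]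
  rw [this, h]
  rfl

lemma floordiv_nonneg_of_nonneg (n M : Int) (hM : 0 < M) (hn : 0 ≤ n) :
    0 ≤ PySem.Int.floordiv n M := by
  rw [PySem.Int.floordiv_eq_ediv_of_pos hM]
  exact Int.ediv_nonneg hn (le_of_lt hM)

lemma mod_le_self (n M : Int) (hM : 0 < M) (hn : 0 ≤ n) : PySem.Int.mod n M ≤ n := by
  have h := PySem.Int.floordiv_mul_add_mod n M
  have hq := floordiv_nonneg_of_nonneg n M hM hn
  nlinarith

-- B's row2[i // M] is the flag of i's own row
lemma row2_getD (l : List Char) (M : Int) (hM : 0 < M) (n : Nat) (hn : n < l.length)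
    (g : Int → Bool) :
    PySem.List.pyGetD ((PySem.List.pyRange 0 (l.length : Int) M).map g)
        (PySem.Int.floordiv (n : Int) M) false
      = g ((n : Int) - PySem.Int.mod (n : Int) M) := by
  set q := PySem.Int.floordiv (n : Int) M with hqdef
  set r := PySem.Int.mod (n : Int) M with hrdef
  have hqr : q * M + r = (n : Int) := PySem.Int.floordiv_mul_add_mod _ _
  have hr0 : 0 ≤ r := PySem.Int.mod_nonneg _ hM
  have hrM : r < M := PySem.Int.mod_lt _ hM
  have hq0 : 0 ≤ q := floordiv_nonneg_of_nonneg _ _ hM (by positivity)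
  have hL : (0 : Int) < (l.length : Int) := by exact_mod_cast Nat.lt_of_le_of_lt (Nat.zero_le n) hn
  rw [PySem.List.pyRange_of_pos 0 (l.length : Int) hM, List.map_map,
      PySem.List.pyGetD_of_nonneg _ _ hq0]
  have hcnt : (if (0 : Int) < (l.length : Int) then (((l.length : Int) - 0 + M - 1) / M).toNat else 0)
      = (((l.length : Int) + M - 1) / M).toNat := by
    rw [if_pos hL]; ring_nf
  rw [hcnt]
  have hqlt : q.toNat < (((l.length : Int) + M - 1) / M).toNat := by
    have h1 : q + 1 ≤ ((l.length : Int) + M - 1) / M := by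
      rw [Int.le_ediv_iff_mul_le hM]
      have : (q + 1) * M = q * M + M := by ring
      rw [this]
      have hnL : (n : Int) < (l.length : Int) := by exact_mod_cast hn
      linarith
    omega
  rw [List.getD_eq_getElem?_getD, List.getElem?_map, List.getElem?_range hqlt]
  simp only [Option.map_some, Option.getD_some, Function.comp]
  congr 1
  have : ((q.toNat : Int)) = q := Int.toNat_of_nonneg hq0
  rw [this]
  linarith

lemma mod_of_shift' (M t k : Int) (hM : 0 < M) (ht : M ∣ t) (h1 : t ≤ k) (h2 : k < t + M) :
    PySem.Int.mod k M = k - t := by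
  refine mod_of_shift M (k - t) k hM (by omega) (by omega) ?_
  simpa using ht

-- main loop lemma for A
lemma loopA_eq (l : List Char) (N M : Int) (hM : 0 < M) :
    ∀ (rest : List Char) (n : Nat) (d : PySem.Dict Int Char), l.drop n = rest →
      (∀ j : Nat, d.getD (j : Int) 'F' ≠ 'F' → badAt l N M j = false) →
      lawnLoopA l N M rest (n : Int) d = if anyBad l N M n then "NO" else "YES" := by
  intro rest
  induction rest with
  | nil =>
      intro n d hdrop hInv
      rw [anyBad_false_of_ge l N M n (List.drop_eq_nil_iff.mp hdrop)]
      simp [lawnLoopA]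
  | cons c rest ih =>
      intro n d hdrop hInv
      have hlen := drop_cons_len l n c rest hdrop
      have hget := drop_cons_getD l n c rest hdrop
      have htail := drop_cons_tail l n c rest hdrop
      have hg2 : l[n]?.getD '2' = c := by simpa [List.getD_eq_getElem?_getD] using hget
      have hcast : ((n : Int) + 1) = ((n + 1 : Nat) : Int) := by push_cast; ring
      have hr0 : 0 ≤ PySem.Int.mod (n : Int) M := PySem.Int.mod_nonneg _ hM
      have hrM : PySem.Int.mod (n : Int) M < M := PySem.Int.mod_lt _ hM
      rw [lawnLoopA]
      by_cases h1 : d.getD (n : Int) 'F' = 'F'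
      · rw [if_pos h1]
        by_cases hc : c = '2'
        · rw [if_pos hc]
          have hbn : badAt l N M n = false := by simp [badAt, hg2, hc]
          rw [hcast, ih (n + 1) _ htail ?_, ← anyBad_succ l N M n hbn]
          intro j hj
          rw [PySem.Dict.getD_insert] at hj
          split_ifs at hj with hjn
          · have : j = n := by exact_mod_cast hjn
            rw [this]; exact hbn
          · exact hInv j hj
        · rw [if_neg hc]
          by_cases hcol : PySem.Chars.find
              ((PySem.List.slice? l (some (PySem.Int.mod (n : Int) M))
                (some ((N - 1) * M + 1 + PySem.Int.mod (n : Int) M)) M).getD []) ['2'] = -1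
          · simp only [if_pos hcol, if_pos hM]
            have hcolHas : colHas l N M (PySem.Int.mod (n : Int) M) = false := (find2_iff _).mp hcol
            have hbn : badAt l N M n = false := by simp [badAt, hcolHas]
            rw [hcast, ih (n + 1) _ htail ?_, ← anyBad_succ l N M n hbn]
            intro j hj
            rw [getD_foldl_insert] at hj
            split_ifs at hj with hjmem
            · rw [PySem.List.mem_pyRange_iff_of_pos hM] at hjmem
              obtain ⟨hj1, hj2, hj3⟩ := hjmem
              have hmodj : PySem.Int.mod (j : Int) M = PySem.Int.mod (n : Int) M :=
                mod_of_shift M _ _ hM hr0 hrM hj3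
              simp [badAt, hmodj, hcolHas]
            · exact hInv j hj
          · simp only [if_neg hcol]
            have ht0 : 0 ≤ (n : Int) - PySem.Int.mod (n : Int) M := by
              have := mod_le_self (n : Int) M hM (by positivity)
              omega
            have hdvdt : M ∣ (n : Int) - PySem.Int.mod (n : Int) M := by
              refine ⟨PySem.Int.floordiv (n : Int) M, ?_⟩
              have := PySem.Int.floordiv_mul_add_mod (n : Int) M
              linarith [mul_comm (PySem.Int.floordiv (n : Int) M) M]
            have hssc2 : (PySem.List.slice? l (some ((n : Int) - PySem.Int.mod (n : Int) M))
                (some (M + ((n : Int) - PySem.Int.mod (n : Int) M))) 1).getD []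
                = PySem.List.slice l (some ((n : Int) - PySem.Int.mod (n : Int) M))
                    (some (((n : Int) - PySem.Int.mod (n : Int) M) + M)) := by
              rw [add_comm M ((n : Int) - PySem.Int.mod (n : Int) M),
                  slice?_one_nonneg l _ _ ht0 (by omega)]
              rfl
            by_cases hrowf : PySem.Chars.find
                ((PySem.List.slice? l (some ((n : Int) - PySem.Int.mod (n : Int) M))
                  (some (M + ((n : Int) - PySem.Int.mod (n : Int) M))) 1).getD []) ['2'] = -1
            · simp only [if_pos hrowf]
              rw [hssc2] at hrowf
              have hrowHas : rowHas l M ((n : Int) - PySem.Int.mod (n : Int) M) = false :=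
                (find2_iff _).mp hrowf
              have hbn : badAt l N M n = false := by simp [badAt, hrowHas]
              rw [hcast, ih (n + 1) _ htail ?_, ← anyBad_succ l N M n hbn]
              intro j hj
              rw [getD_foldl_insert] at hj
              split_ifs at hj with hjmem
              · rw [PySem.List.mem_pyRange_one] at hjmem
                have hmodj : PySem.Int.mod (j : Int) M = (j : Int) - ((n : Int) - PySem.Int.mod (n : Int) M) :=
                  mod_of_shift' M _ _ hM hdvdt hjmem.1 (by omega)
                have harg : (j : Int) - PySem.Int.mod (j : Int) M = (n : Int) - PySem.Int.mod (n : Int) M := by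
                  omega
                simp [badAt, harg, hrowHas]
              · exact hInv j hj
            · simp only [if_neg hrowf]
              rw [hssc2] at hrowf
              have hbn : badAt l N M n = true := by
                have hcolHas : colHas l N M (PySem.Int.mod (n : Int) M) = true := by
                  rcases Bool.eq_false_or_eq_true (colHas l N M (PySem.Int.mod (n : Int) M)) with h | h
                  · exact h
                  · exact absurd ((find2_iff _).mpr h) hcol
                have hrowHas : rowHas l M ((n : Int) - PySem.Int.mod (n : Int) M) = true := by
                  rcases Bool.eq_false_or_eq_true (rowHas l M ((n : Int) - PySem.Int.mod (n : Int) M)) with h | h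
                  · exact h
                  · exact absurd ((find2_iff _).mpr h) hrowf
                simp [badAt, hg2, hc, hcolHas, hrowHas]
              rw [anyBad_true l N M n hlen hbn]
              rfl
      · rw [if_neg h1]
        have hbn : badAt l N M n = false := hInv n h1
        rw [hcast, ih (n + 1) _ htail hInv, ← anyBad_succ l N M n hbn]

-- main loop lemma for B
lemma loopB_eq (l : List Char) (N M : Int) (hM : 0 < M) :
    ∀ (rest : List Char) (n : Nat), l.drop n = rest →
      lawnLoopB
        ((PySem.List.pyRange 0 (min M (l.length : Int)) 1).map
          (fun r => PySem.Chars.isIn ['2'] ((PySem.List.slice? l (some r) (some ((N - 1) * M + 1 + r)) M).getD [])))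
        ((PySem.List.pyRange 0 (l.length : Int) M).map
          (fun t => PySem.Chars.isIn ['2'] (PySem.List.slice l (some t) (some (t + M)))))
        M (PySem.List.enumerate rest (n : Int)) = if anyBad l N M n then "NO" else "YES" := by
  intro rest
  induction rest with
  | nil =>
      intro n hdrop
      rw [anyBad_false_of_ge l N M n (List.drop_eq_nil_iff.mp hdrop)]
      simp [PySem.List.enumerate_nil, lawnLoopB]
  | cons c rest ih =>
      intro n hdrop
      have hlen := drop_cons_len l n c rest hdrop
      have hget := drop_cons_getD l n c rest hdrop
      have htail := drop_cons_tail l n c rest hdrop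
      rw [PySem.List.enumerate_cons, lawnLoopB]
      have hcol : PySem.List.pyGetD
          ((PySem.List.pyRange 0 (min M (l.length : Int)) 1).map
            (fun r => PySem.Chars.isIn ['2'] ((PySem.List.slice? l (some r) (some ((N - 1) * M + 1 + r)) M).getD [])))
          (PySem.Int.mod (n : Int) M) false = colHas l N M (PySem.Int.mod (n : Int) M) := by
        have hlt : PySem.Int.mod (n : Int) M < min M (l.length : Int) := by
          refine lt_min (PySem.Int.mod_lt _ hM) ?_
          have h1 := mod_le_self (n : Int) M hM (by positivity)
          have h2 : (n : Int) < (l.length : Int) := by exact_mod_cast hlen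
          omega
        rw [PySem.List.pyGetD_map_pyRange_of_nonneg _ (min M (l.length : Int)) _ false
          (PySem.Int.mod_nonneg _ hM) hlt]
        rfl
      have hrow := row2_getD l M hM n hlen
        (fun t => PySem.Chars.isIn ['2'] (PySem.List.slice l (some t) (some (t + M))))
      have hcond : (c ≠ '2' && PySem.List.pyGetD
            ((PySem.List.pyRange 0 (min M (l.length : Int)) 1).map
              (fun r => PySem.Chars.isIn ['2'] ((PySem.List.slice? l (some r) (some ((N - 1) * M + 1 + r)) M).getD [])))
            (PySem.Int.mod (n : Int) M) false
          && PySem.List.pyGetD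
            ((PySem.List.pyRange 0 (l.length : Int) M).map
              (fun t => PySem.Chars.isIn ['2'] (PySem.List.slice l (some t) (some (t + M)))))
            (PySem.Int.floordiv (n : Int) M) false) = badAt l N M n := by
        rw [hcol, hrow]
        have hg2 : l[n]?.getD '2' = c := by simpa [List.getD_eq_getElem?_getD] using hget
        simp only [badAt, rowHas, Bool.and_assoc, bne]
        by_cases hc : c = '2' <;> simp [hc, hg2]
      rw [hcond]
      by_cases hb : badAt l N M n = true
      · rw [if_pos hb, anyBad_true l N M n hlen hb]
        rfl
      · rw [if_neg hb]
        have hb' : badAt l N M n = false := by simpa using hb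
        have : ((n : Int) + 1) = ((n + 1 : Nat) : Int) := by push_cast; ring
        rw [this, ih (n + 1) htail, ← anyBad_succ l N M n hb']

-- ===== VERDICT (by name: the statement is the Claim_ definition above) =====
theorem lawnmover_spec : Claim_equal_lawnmover := by
  intro string N M hD hP
  unfold Spec_lawnmover
  rcases hP with hE | hM
  · subst hE
    rfl
  · have hInv0 : ∀ j : Nat, (lawnInit string.toList 0 PySem.Dict.empty).getD (j : Int) 'F' ≠ 'F' →
        badAt string.toList N M j = false := by
      intro j hj
      exact absurd (lawnInit_getD string.toList 0 PySem.Dict.empty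
        (fun k => PySem.Dict.getD_empty k 'F') (j : Int)) hj
    have hA := loopA_eq string.toList N M hM string.toList 0 (lawnInit string.toList 0 PySem.Dict.empty)
      (by simp) hInv0
    simp only [Nat.cast_zero] at hA
    by_cases hEmp : string.toList.isEmpty
    · have hnil : string.toList = [] := by simpa using hEmp
      simp only [lawnmover, lawnmover_alt, hnil, lawnLoopA, List.isEmpty_nil, if_true]
    · have hB := loopB_eq string.toList N M hM string.toList 0 rfl
      simp only [Nat.cast_zero] at hB
      simp only [lawnmover, lawnmover_alt, hEmp]
      rw [hA]
      simp only [Bool.false_eq_true, if_false]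
      rw [hB]
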